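-- pv_equiv track=rewrite | github.com/VishwaPriya-Karthikeyan/RAG-PDF-Chatbot | mypdf/app/core_rag.py | _synthesize_for_llm
-- ===== SOURCE A (Python) =====
-- from typing import List, Tuple, Optional
--
-- def _synthesize_for_llm(chunks: List[str], max_chars: int = 3500) -> str:
--     """
--     Combines selected chunks into a single string for the LLM,
--     respecting a maximum character limit.
--     Adds clear separators between chunks.
--     """
--     out = []
--     current_len = 0
--     for i, c in enumerate(chunks):
--         chunk_to_add = c.strip()
--         # Add a clear separator to distinguish chunks for the LLM
--         if i > 0:
--             chunk_to_add = "\n--- Document Snippet Start ---\n" + chunk_to_add + "\n--- Document Snippet End ---\n"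
--
--         if current_len + len(chunk_to_add) > max_chars:
--             break
--         out.append(chunk_to_add)
--         current_len += len(chunk_to_add)
--
--     return "\n".join(out).strip()
-- ===== SOURCE B (Python) =====
-- from typing import List
--
-- def _synthesize_for_llm(chunks: List[str], max_chars: int = 3500) -> str:
--     """Phase-separated rewrite: format all chunks, compute prefix sums of their
--     lengths, cut at the longest prefix whose total fits, then join and strip."""
--     formatted = [
--         c.strip() if i == 0 else
--         "\n--- Document Snippet Start ---\n" + c.strip() + "\n--- Document Snippet End ---\n"
--         for i, c in enumerate(chunks)
--     ]
--     totals = []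
--     running = 0
--     for f in formatted:
--         running += len(f)
--         totals.append(running)
--     cut = 0
--     while cut < len(totals) and totals[cut] <= max_chars:
--         cut += 1
--     return "\n".join(formatted[:cut]).strip()
-- ===== Notes on version B (the rewrite author's own statement) =====
-- stated objective: alternative
-- what changed: Replaces A's interleaved accumulate-and-break loop with three separate phases: format every chunk, compute running prefix sums of lengths, then cut at the longest prefix whose total fits and join it.
import Mathlib
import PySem

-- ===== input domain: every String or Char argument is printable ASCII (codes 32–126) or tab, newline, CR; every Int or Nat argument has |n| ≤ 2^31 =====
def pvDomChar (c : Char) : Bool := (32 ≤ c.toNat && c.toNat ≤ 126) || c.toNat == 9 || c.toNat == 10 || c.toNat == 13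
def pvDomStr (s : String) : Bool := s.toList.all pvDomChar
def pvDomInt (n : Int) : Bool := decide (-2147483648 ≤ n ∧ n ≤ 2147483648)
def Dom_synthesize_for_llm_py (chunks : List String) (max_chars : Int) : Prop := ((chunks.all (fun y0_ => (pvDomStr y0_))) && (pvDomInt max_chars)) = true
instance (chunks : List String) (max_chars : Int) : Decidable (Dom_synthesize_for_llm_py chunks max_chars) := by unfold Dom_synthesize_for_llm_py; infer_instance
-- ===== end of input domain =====

-- B re-implements A in three separate phases (format all, prefix sums, cut & join) instead of one accumulate-and-break loop; same cost, proved equal on all inputs.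

def pvSepStart : List Char := "\n--- Document Snippet Start ---\n".toList
def pvSepEnd : List Char := "\n--- Document Snippet End ---\n".toList

-- ===== PORT A =====
-- A's for-loop over enumerate(chunks): out/current_len accumulators, break on overflow.
def synthALoop (ps : List (Int × String)) (out : List (List Char)) (current_len : Int)
    (max_chars : Int) : List (List Char) :=
  match ps with
  | [] => out
  | (i, c) :: rest =>
    let s := PySem.Chars.strip c.toList
    let chunk := if 0 < i then pvSepStart ++ s ++ pvSepEnd else s
    if current_len + PySem.Chars.len chunk > max_chars then out
    else synthALoop rest (out ++ [chunk]) (current_len + PySem.Chars.len chunk) max_chars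

def synthesize_for_llm_py (chunks : List String) (max_chars : Int) : String :=
  String.mk (PySem.Chars.strip
    (PySem.Chars.join ['\n'] (synthALoop (PySem.List.enumerate chunks 0) [] 0 max_chars)))

-- ===== PORT B =====
-- phase 1: format every chunk
def fmtB (p : Int × String) : List Char :=
  let s := PySem.Chars.strip p.2.toList
  if 0 < p.1 then pvSepStart ++ s ++ pvSepEnd else s

-- phase 2: running prefix sums of lengths (the Python for-loop over `formatted`)
def totalsB (fs : List (List Char)) : List Int :=
  (fs.foldl (fun acc f => (acc.1 ++ [acc.2 + PySem.Chars.len f], acc.2 + PySem.Chars.len f))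
    (([] : List Int), (0 : Int))).1

-- phase 3: the while-loop finding the cut index
def cutB (totals : List Int) (max_chars : Int) : Nat :=
  match totals with
  | [] => 0
  | t :: ts => if t ≤ max_chars then cutB ts max_chars + 1 else 0

def synthesize_for_llm_py_alt (chunks : List String) (max_chars : Int) : String :=
  let formatted := (PySem.List.enumerate chunks 0).map fmtB
  let cut := cutB (totalsB formatted) max_chars
  String.mk (PySem.Chars.strip (PySem.Chars.join ['\n'] (formatted.take cut)))

-- ===== PRECONDITION & SPEC =====
def Spec_synthesize_for_llm_py (chunks : List String) (max_chars : Int) (out : String) : Prop := out = synthesize_for_llm_py_alt chunks max_chars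
instance (chunks : List String) (max_chars : Int) (out : String) : Decidable (Spec_synthesize_for_llm_py chunks max_chars out) := by unfold Spec_synthesize_for_llm_py; infer_instance

-- ===== CLAIM (what is proved, stated in full; the proofs are below) =====
def Claim_equal_synthesize_for_llm_py : Prop := ∀ (chunks : List String) (max_chars : Int), Dom_synthesize_for_llm_py chunks max_chars → Spec_synthesize_for_llm_py chunks max_chars (synthesize_for_llm_py chunks max_chars)

-- ===== LEMMAS AND PROOFS =====

-- the running prefix sums starting from t, in recursive form
def prefSums (fs : List (List Char)) (t : Int) : List Int :=
  match fs with
  | [] => []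
  | f :: r => (t + PySem.Chars.len f) :: prefSums r (t + PySem.Chars.len f)

theorem totalsB_aux (fs : List (List Char)) (acc : List Int) (t : Int) :
    fs.foldl (fun acc f => (acc.1 ++ [acc.2 + PySem.Chars.len f], acc.2 + PySem.Chars.len f))
      (acc, t) = (acc ++ prefSums fs t, t + (fs.map (fun f => PySem.Chars.len f)).sum) := by
  induction fs generalizing acc t with
  | nil => simp [prefSums]
  | cons f r ih =>
    rw [List.foldl_cons, ih, prefSums]
    refine Prod.ext ?_ ?_
    · simp
    · simp; ring

theorem totalsB_eq (fs : List (List Char)) : totalsB fs = prefSums fs 0 := by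
  unfold totalsB
  rw [totalsB_aux]
  simp

theorem synthALoop_append (ps : List (Int × String)) (out1 out2 : List (List Char))
    (cur m : Int) :
    synthALoop ps (out1 ++ out2) cur m = out1 ++ synthALoop ps out2 cur m := by
  induction ps generalizing out2 cur with
  | nil => rfl
  | cons p r ih =>
    obtain ⟨i, c⟩ := p
    simp only [synthALoop]
    split <;> split <;> first
      | rfl
      | (rw [List.append_assoc]; exact ih _ _)

theorem synthALoop_eq_take (ps : List (Int × String)) (cur m : Int) :
    synthALoop ps [] cur m = (ps.map fmtB).take (cutB (prefSums (ps.map fmtB) cur) m) := by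
  induction ps generalizing cur with
  | nil => rfl
  | cons p r ih =>
    obtain ⟨i, c⟩ := p
    rw [List.map_cons, prefSums, cutB]
    show (if m < cur + PySem.Chars.len (fmtB (i, c)) then []
          else synthALoop r ([] ++ [fmtB (i, c)]) (cur + PySem.Chars.len (fmtB (i, c))) m) = _
    by_cases h : m < cur + PySem.Chars.len (fmtB (i, c))
    · rw [if_pos h, if_neg (by omega)]
      simp
    · rw [if_neg h, if_pos (by omega), List.nil_append,
        show [fmtB (i, c)] = [fmtB (i, c)] ++ ([] : List (List Char)) from (List.append_nil _).symm,
        synthALoop_append, ih, List.take_succ_cons]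
      rfl

-- ===== VERDICT (by name: the statement is the Claim_ definition above) =====
theorem synthesize_for_llm_py_spec : Claim_equal_synthesize_for_llm_py := by
  intro chunks max_chars _
  unfold Spec_synthesize_for_llm_py synthesize_for_llm_py synthesize_for_llm_py_alt
  simp only [synthALoop_eq_take, totalsB_eq]
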